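-- pv_equiv track=rewrite | github.com/ahmetdrak/drakben | modules/waf_evasion.py | _obfuscate_hex_encoding
-- ===== SOURCE A (Python) =====
-- import binascii
--
-- def _obfuscate_hex_encoding(payload: str) -> str:
--     """Encode string literals to hex for WAF bypass."""
--     if "'" not in payload:
--         return payload
--     parts = payload.split("'")
--     new_parts = []
--     for i, part in enumerate(parts):
--         if i % 2 == 1:  # Inside quotes
--             hex_val = "0x" + binascii.hexlify(part.encode()).decode()
--             new_parts.append(hex_val)
--         else:
--             new_parts.append(part)
--     return "".join(new_parts)
-- ===== SOURCE B (Python) =====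
-- def _obfuscate_hex_encoding(payload: str) -> str:
--     """Single-pass scanner: toggle an `inside` flag at each quote; hex-encode
--     buffered quoted text when a quote closes (or at end of input)."""
--     out = []
--     buf = []
--     inside = False
--     for ch in payload:
--         if ch == "'":
--             if inside:
--                 out.append("0x" + "".join(buf).encode().hex())
--                 buf = []
--             inside = not inside
--         elif inside:
--             buf.append(ch)
--         else:
--             out.append(ch)
--     if inside:
--         out.append("0x" + "".join(buf).encode().hex())
--     return "".join(out)
-- ===== Notes on version B (the rewrite author's own statement) =====
-- stated objective: alternative
-- what changed: Replaced split("'") plus enumerate-index-parity over the parts with a single-pass character scanner that toggles an inside-quotes flag and hex-encodes the buffered quoted text when a quote closes (or at end of input).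
import Mathlib
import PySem

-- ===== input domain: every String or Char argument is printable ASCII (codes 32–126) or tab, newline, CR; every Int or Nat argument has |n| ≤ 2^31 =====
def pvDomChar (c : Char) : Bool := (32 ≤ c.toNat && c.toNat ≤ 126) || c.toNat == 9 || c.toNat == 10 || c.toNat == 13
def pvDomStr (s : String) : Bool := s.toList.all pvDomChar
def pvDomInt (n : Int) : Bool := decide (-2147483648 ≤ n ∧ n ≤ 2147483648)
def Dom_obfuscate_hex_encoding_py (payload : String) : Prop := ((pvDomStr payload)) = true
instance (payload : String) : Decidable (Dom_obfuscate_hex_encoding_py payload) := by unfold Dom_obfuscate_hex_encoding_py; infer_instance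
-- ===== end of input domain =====

-- B replaces A's split-on-quote / index-parity pass with a single-pass quote-toggling
-- scanner (objective: alternative decomposition, same cost); the return values agree.

-- shared helper: binascii.hexlify(part.encode()).decode() — two lowercase hex digits
-- per character; exact on the one-byte (ASCII) characters of Dom.
def hexDigit (n : Nat) : Char := if n < 10 then Char.ofNat (48 + n) else Char.ofNat (87 + n)
def hexlifyChars (cs : List Char) : List Char :=
  cs.flatMap (fun c => [hexDigit (c.toNat / 16), hexDigit (c.toNat % 16)])
-- "0x" + hexlify(p)
def hxChunk (p : List Char) : List Char := '0' :: 'x' :: hexlifyChars p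

-- ===== PORT A =====
def obfuscate_hex_encoding_py (payload : String) : String :=
  if !(PySem.Str.isIn "'" payload) then payload
  else
    -- parts = payload.split("'"); new_parts = the enumerate/parity loop; "".join(new_parts)
    String.ofList (PySem.Chars.join []
      ((PySem.List.enumerate (PySem.Chars.splitOn payload.toList ['\''])).foldl
        (fun acc ip => acc ++ [if PySem.Int.mod ip.1 2 == 1 then hxChunk ip.2 else ip.2]) []))

-- ===== PORT B =====
-- the scanner loop: out = emitted chars, inside = within quotes, buf = quoted text so far
def bGo (cs : List Char) (out : List Char) (inside : Bool) (buf : List Char) : List Char :=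
  match cs with
  | [] => if inside then out ++ hxChunk buf else out
  | c :: rest =>
    if c = '\'' then
      if inside then bGo rest (out ++ hxChunk buf) false []
      else bGo rest out true []
    else if inside then bGo rest out inside (buf ++ [c])
    else bGo rest (out ++ [c]) inside buf

def obfuscate_hex_encoding_py_alt (payload : String) : String :=
  String.ofList (bGo payload.toList [] false [])

-- ===== PRECONDITION & SPEC =====
def Spec_obfuscate_hex_encoding_py (payload : String) (out : String) : Prop := out = obfuscate_hex_encoding_py_alt payload
instance (payload : String) (out : String) : Decidable (Spec_obfuscate_hex_encoding_py payload out) := by unfold Spec_obfuscate_hex_encoding_py; infer_instance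

-- ===== CLAIM (what is proved, stated in full; the proofs are below) =====
def Claim_equal_obfuscate_hex_encoding_py : Prop := ∀ (payload : String), Dom_obfuscate_hex_encoding_py payload → Spec_obfuscate_hex_encoding_py payload (obfuscate_hex_encoding_py payload)

-- ===== LEMMAS AND PROOFS =====

-- reference splitter: Python's split("'") written as plain structural recursion
def splitQ (buf : List Char) : List Char → List (List Char)
  | [] => [buf]
  | c :: rest => if c = '\'' then buf :: splitQ [] rest else splitQ (buf ++ [c]) rest

-- "outside quotes" / "inside quotes" renderings of the rest of the string
mutual
def gOut : List Char → List Char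
  | [] => []
  | c :: rest => if c = '\'' then gIn [] rest else c :: gOut rest
def gIn (buf : List Char) : List Char → List Char
  | [] => hxChunk buf
  | c :: rest => if c = '\'' then hxChunk buf ++ gOut rest else gIn (buf ++ [c]) rest
end

-- alternating flattening of the split pieces: even positions plain, odd positions hexed
mutual
def flatE : List (List Char) → List Char
  | [] => []
  | p :: ps => p ++ flatO ps
def flatO : List (List Char) → List Char
  | [] => []
  | p :: ps => hxChunk p ++ flatE ps
end

lemma splitOn_go_eq (fuel : Nat) : ∀ (l cur : List Char) (accs : List (List Char)),
    l.length ≤ fuel →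
    PySem.Chars.splitOn.go ['\''] fuel l cur accs = accs.reverse ++ splitQ cur.reverse l := by
  induction fuel with
  | zero =>
    intro l cur accs h
    have : l = [] := List.length_eq_zero_iff.mp (Nat.le_zero.mp h)
    subst this
    simp [PySem.Chars.splitOn.go, splitQ]
  | succ n ih =>
    intro l cur accs h
    cases l with
    | nil => simp [PySem.Chars.splitOn.go, splitQ]
    | cons c rest =>
      rw [PySem.Chars.splitOn.go]
      by_cases hc : c = '\''
      · subst hc
        have hpre : ['\''].isPrefixOf ('\'' :: rest) = true := by
          simp [List.isPrefixOf]
        rw [if_pos hpre]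
        simp only [List.length_cons] at h
        rw [ih _ _ _ (by simpa using Nat.le_of_succ_le_succ h)]
        simp [splitQ]
      · have hpre : ['\''].isPrefixOf (c :: rest) = false := by
          simp [List.isPrefixOf]
          intro hcc; exact hc hcc.symm
        rw [if_neg (by simp [hpre])]
        simp only [List.length_cons] at h
        rw [ih _ _ _ (Nat.le_of_succ_le_succ h)]
        simp [splitQ, hc]

lemma splitOn_eq_splitQ (cs : List Char) :
    PySem.Chars.splitOn cs ['\''] = splitQ [] cs := by
  rw [PySem.Chars.splitOn]
  simpa using splitOn_go_eq (cs.length + 1) cs [] [] (by omega)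

lemma flat_splitQ (cs : List Char) : ∀ buf : List Char,
    (flatE (splitQ buf cs) = buf ++ gOut cs) ∧ (flatO (splitQ buf cs) = gIn buf cs) := by
  induction cs with
  | nil => intro buf; simp [splitQ, flatE, flatO, gOut, gIn]
  | cons c rest ih =>
    intro buf
    by_cases hc : c = '\''
    · subst hc
      simp [splitQ, flatE, flatO, gOut, gIn, (ih []).1, (ih []).2]
    · simp [splitQ, gOut, gIn, hc, (ih (buf ++ [c])).1, (ih (buf ++ [c])).2]

lemma bGo_eq (cs : List Char) : ∀ out buf : List Char,
    (bGo cs out false buf = out ++ gOut cs) ∧ (bGo cs out true buf = out ++ gIn buf cs) := by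
  induction cs with
  | nil => intro out buf; simp [bGo, gOut, gIn]
  | cons c rest ih =>
    intro out buf
    by_cases hc : c = '\''
    · subst hc
      constructor
      · rw [show bGo ('\'' :: rest) out false buf = bGo rest out true [] by simp [bGo]]
        simp [gOut, (ih out []).2]
      · rw [show bGo ('\'' :: rest) out true buf = bGo rest (out ++ hxChunk buf) false [] by simp [bGo]]
        simp [gIn, (ih (out ++ hxChunk buf) []).1]
    · constructor
      · rw [show bGo (c :: rest) out false buf = bGo rest (out ++ [c]) false buf by simp [bGo, hc]]
        simp [gOut, hc, (ih (out ++ [c]) buf).1]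
      · rw [show bGo (c :: rest) out true buf = bGo rest out true (buf ++ [c]) by simp [bGo, hc]]
        simp [gIn, hc, (ih out (buf ++ [c])).2]

lemma gOut_no_quote (cs : List Char) (h : '\'' ∉ cs) : gOut cs = cs := by
  induction cs with
  | nil => simp [gOut]
  | cons c rest ih =>
    have hc : c ≠ '\'' := by rintro rfl; exact h (by simp)
    simp [gOut, fun hcc => hc hcc, ih (fun hm => h (by simp [hm]))]

lemma join_enumerate (ps : List (List Char)) : ∀ k : Nat,
    PySem.Chars.join []
      ((PySem.List.enumerate ps (k : Int)).map
        (fun ip => if PySem.Int.mod ip.1 2 == 1 then hxChunk ip.2 else ip.2)) =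
    if k % 2 = 0 then flatE ps else flatO ps := by
  induction ps with
  | nil => intro k; simp [PySem.List.enumerate_nil, PySem.Chars.join_nil, flatE, flatO]
  | cons p ps ih =>
    intro k
    rw [PySem.List.enumerate_cons]
    have hcast : (k : Int) + 1 = ((k + 1 : Nat) : Int) := by push_cast; ring
    rw [hcast]
    have hmod : PySem.Int.mod (k : Int) 2 = ((k % 2 : Nat) : Int) := by
      exact_mod_cast PySem.Int.mod_natCast k 2
    simp only [List.map_cons]
    rw [show PySem.Chars.join [] ((if PySem.Int.mod (k:Int) 2 == 1 then hxChunk p else p) :: _) =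
      (if PySem.Int.mod (k:Int) 2 == 1 then hxChunk p else p) ++ PySem.Chars.join [] _ from ?_]
    · rw [ih (k + 1), hmod]
      rcases Nat.even_or_odd k with he | ho
      · have h0 : k % 2 = 0 := Nat.even_iff.mp he
        have h1 : (k + 1) % 2 = 1 := by omega
        simp [h0, h1, flatE]
      · have h0 : k % 2 = 1 := Nat.odd_iff.mp ho
        have h1 : (k + 1) % 2 = 0 := by omega
        simp [h0, h1, flatO]
    · cases ps with
      | nil => simp [PySem.List.enumerate_nil, PySem.Chars.join_singleton, PySem.Chars.join_nil]
      | cons q qs => rw [PySem.List.enumerate_cons]; simp [PySem.Chars.join_cons_cons]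

lemma infix_singleton (a : Char) (l : List Char) : [a] <:+: l ↔ a ∈ l := by
  constructor
  · intro h; exact h.subset (by simp)
  · intro h
    obtain ⟨s, t, rfl⟩ := List.append_of_mem h
    exact ⟨s, t, by simp⟩

-- ===== VERDICT (by name: the statement is the Claim_ definition above) =====
theorem obfuscate_hex_encoding_py_spec : Claim_equal_obfuscate_hex_encoding_py := by
  intro payload _
  unfold Spec_obfuscate_hex_encoding_py obfuscate_hex_encoding_py obfuscate_hex_encoding_py_alt
  rw [(bGo_eq payload.toList [] []).1, List.nil_append]
  by_cases hin : PySem.Str.isIn "'" payload = true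
  · have hin' : PySem.Chars.isIn ['\''] payload.toList = true := by
      simpa [PySem.Str.isIn_eq] using hin
    rw [if_neg (by simp [hin'])]
    rw [splitOn_eq_splitQ]
    rw [PySem.List.foldl_append_singleton_eq_map
      (fun ip : Int × List Char => if PySem.Int.mod ip.1 2 == 1 then hxChunk ip.2 else ip.2)
      (PySem.List.enumerate (splitQ [] payload.toList)) []]
    have hj := join_enumerate (splitQ [] payload.toList) 0
    simp only [Nat.cast_zero] at hj
    rw [List.nil_append, hj]
    simp [(flat_splitQ payload.toList []).1]
  · have hfalse : PySem.Str.isIn "'" payload = false := by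
      cases hv : PySem.Str.isIn "'" payload with
      | false => rfl
      | true => exact absurd hv hin
    have hin' : PySem.Chars.isIn ['\''] payload.toList = false := by
      simpa [PySem.Str.isIn_eq] using hfalse
    rw [if_pos (by simp [hin'])]
    have hni : ('\'' : Char) ∉ payload.toList := by
      have hinf := (PySem.Chars.isIn_eq_false_iff ['\''] payload.toList).mp hin'
      intro hm
      exact hinf ((infix_singleton '\'' payload.toList).mpr hm)
    rw [gOut_no_quote payload.toList hni]
    simp [String.ofList]
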